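-- pv_equiv track=rewrite | github.com/MykolaPinchuk/demas_a2_v05 | scripts/select_easy_diverse.py | metrics_from_patch_text
-- ===== SOURCE A (Python) =====
-- def metrics_from_patch_text(patch_text: str):
--     lines = patch_text.splitlines()
--     n_lines = len(lines)
--     n_add = sum(1 for x in lines if x.startswith('+'))
--     n_del = sum(1 for x in lines if x.startswith('-'))
--     n_hunks = sum(1 for x in lines if x.startswith('@@'))
--     n_files = len([x for x in lines if x.startswith('diff --git ')])
--     if n_files == 0:
--         n_files = len([x for x in lines if x.startswith('+++ ')])
--     return n_lines, n_add, n_del, n_hunks, n_files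
-- ===== SOURCE B (Python) =====
-- def _flush(buf, st):
--     s = ''.join(buf)
--     nl, a, d, h, g, p = st
--     return (nl + 1,
--             a + s.startswith('+'),
--             d + s.startswith('-'),
--             h + s.startswith('@@'),
--             g + s.startswith('diff --git '),
--             p + s.startswith('+++ '))
--
--
-- def metrics_from_patch_text(patch_text: str):
--     # streaming scan over the raw string: no line list is built
--     st = (0, 0, 0, 0, 0, 0)
--     buf = []
--     i, n = 0, len(patch_text)
--     while i < n:
--         c = patch_text[i]
--         if c == '\n' or c == '\r':
--             st = _flush(buf, st)
--             buf = []
--             i += 2 if c == '\r' and i + 1 < n and patch_text[i + 1] == '\n' else 1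
--         else:
--             buf.append(c)
--             i += 1
--     if buf:
--         st = _flush(buf, st)
--     nl, a, d, h, g, p = st
--     return nl, a, d, h, (g if g else p)
-- ===== Notes on version B (the rewrite author's own statement) =====
-- stated objective: alternative
-- what changed: Replaces A's splitlines + five separate passes over the materialised line list with a single streaming character scan over the raw string that detects \n/\r/\r\n terminators itself, keeps only the current line's characters in a buffer, and flushes all six counters once per line; no line list is ever built.
import Mathlib
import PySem

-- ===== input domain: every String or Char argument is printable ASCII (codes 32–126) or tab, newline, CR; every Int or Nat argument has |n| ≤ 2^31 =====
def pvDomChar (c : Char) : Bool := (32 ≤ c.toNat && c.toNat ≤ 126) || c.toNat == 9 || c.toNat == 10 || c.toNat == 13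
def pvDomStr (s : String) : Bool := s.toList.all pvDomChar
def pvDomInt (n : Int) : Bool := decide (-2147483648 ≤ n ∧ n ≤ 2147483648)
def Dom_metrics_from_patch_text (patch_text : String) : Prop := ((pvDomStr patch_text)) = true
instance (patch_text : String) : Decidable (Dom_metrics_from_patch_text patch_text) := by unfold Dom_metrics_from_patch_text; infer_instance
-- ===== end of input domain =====

-- B replaces A's splitlines + five passes over the line list by a single streaming
-- character scan of the raw string (terminators \n/\r/\r\n detected by the scan itself,
-- only the current-line buffer kept); objective: alternative, same O(n) cost.

-- ===== PORT A =====
-- sum(1 for x in lines if x.startswith(p))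
def pvCountPrefix (p : String) (lines : List String) : Int :=
  lines.foldl (fun acc x => if PySem.Str.startswith x p then acc + 1 else acc) 0

def metrics_from_patch_text (patch_text : String) : Int × Int × Int × Int × Int :=
  let lines := PySem.Str.splitlines patch_text
  let n_lines : Int := lines.length
  let n_add := pvCountPrefix "+" lines
  let n_del := pvCountPrefix "-" lines
  let n_hunks := pvCountPrefix "@@" lines
  let n_files : Int := ((lines.filter (fun x => PySem.Str.startswith x "diff --git ")).length : Int)
  let n_files := if n_files = 0 then ((lines.filter (fun x => PySem.Str.startswith x "+++ ")).length : Int) else n_files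
  (n_lines, n_add, n_del, n_hunks, n_files)

-- ===== PORT B =====
-- _flush(buf, st): close the current line, bumping all six counters at once
def pvFlush (buf : List Char) (st : Int × Int × Int × Int × Int × Int) :
    Int × Int × Int × Int × Int × Int :=
  let (nl, a, d, h, g, p) := st
  (nl + 1,
   a + (if PySem.Chars.startswith buf "+".toList then 1 else 0),
   d + (if PySem.Chars.startswith buf "-".toList then 1 else 0),
   h + (if PySem.Chars.startswith buf "@@".toList then 1 else 0),
   g + (if PySem.Chars.startswith buf "diff --git ".toList then 1 else 0),
   p + (if PySem.Chars.startswith buf "+++ ".toList then 1 else 0))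

-- the while-loop of Source B: one pass over the characters; the '\r\n' peek consumes two
def pvScan : List Char → List Char → Int × Int × Int × Int × Int × Int →
    Int × Int × Int × Int × Int × Int
  | [], buf, st => if buf.isEmpty then st else pvFlush buf st
  | '\r' :: '\n' :: rest, buf, st => pvScan rest [] (pvFlush buf st)
  | c :: rest, buf, st =>
      if c = '\n' ∨ c = '\r' then pvScan rest [] (pvFlush buf st)
      else pvScan rest (buf ++ [c]) st

def metrics_from_patch_text_alt (patch_text : String) : Int × Int × Int × Int × Int :=
  let (nl, a, d, h, g, p) := pvScan patch_text.toList [] (0, 0, 0, 0, 0, 0)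
  (nl, a, d, h, if g ≠ 0 then g else p)

-- ===== PRECONDITION & SPEC =====
def Spec_metrics_from_patch_text (patch_text : String) (out : Int × Int × Int × Int × Int) : Prop := out = metrics_from_patch_text_alt patch_text
instance (patch_text : String) (out : Int × Int × Int × Int × Int) : Decidable (Spec_metrics_from_patch_text patch_text out) := by unfold Spec_metrics_from_patch_text; infer_instance

-- ===== CLAIM =====
def Claim_equal_metrics_from_patch_text : Prop := ∀ (patch_text : String), Dom_metrics_from_patch_text patch_text → Spec_metrics_from_patch_text patch_text (metrics_from_patch_text patch_text)

-- ===== LEMMAS AND PROOFS =====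

-- the line-break predicate used inside PySem.Chars.splitlines
def pvIsB (c : Char) : Bool :=
  let n := c.toNat
  decide (n = 10) || decide (n = 13) || decide (n = 11) || decide (n = 12) ||
    decide (n = 28) || decide (n = 29) || decide (n = 30) || decide (n = 133) ||
    decide (n = 8232) || decide (n = 8233)

theorem pvSplitlines_eq (s : List Char) :
    PySem.Chars.splitlines s = PySem.Chars.splitlines.go pvIsB s [] [] := rfl

theorem pvCharEq_of_toNat {c d : Char} (h : c.toNat = d.toNat) : c = d :=
  Char.ext (UInt32.toNat_inj.mp h)

-- on the domain's characters the only line breaks are \n and \r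
theorem pvIsB_dom (c : Char) (h : pvDomChar c = true) :
    pvIsB c = decide (c = '\n' ∨ c = '\r') := by
  by_cases h10 : c.toNat = 10
  · have : c = '\n' := pvCharEq_of_toNat h10
    subst this; decide
  · by_cases h13 : c.toNat = 13
    · have : c = '\r' := pvCharEq_of_toNat h13
      subst this; decide
    · have hne1 : c ≠ '\n' := fun he => h10 (by simp [he])
      have hne2 : c ≠ '\r' := fun he => h13 (by simp [he])
      simp only [pvDomChar, Bool.or_eq_true, Bool.and_eq_true, decide_eq_true_eq,
        beq_iff_eq] at h
      simp only [pvIsB, hne1, hne2, or_self, decide_false]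
      simp only [Bool.or_eq_false_iff, decide_eq_false_iff_not]
      omega

-- one-step equation for splitlines.go on a cons that is not the '\r\n' pattern
theorem pvGo_cons (isB : Char → Bool) (c : Char) (rest cur : List Char)
    (acc : List (List Char)) (h : ¬(c = '\r' ∧ rest.head? = some '\n')) :
    PySem.Chars.splitlines.go isB (c :: rest) cur acc =
      if isB c then PySem.Chars.splitlines.go isB rest [] (cur.reverse :: acc)
      else PySem.Chars.splitlines.go isB rest (c :: cur) acc := by
  rw [PySem.Chars.splitlines.go.eq_def]
  split
  · simp_all
  · rename_i heq
    injection heq with h1 h2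
    exact absurd ⟨h1, by simp [h2]⟩ h
  · rename_i heq
    injection heq with h1 h2
    subst h1; subst h2; rfl

-- one-step equation for pvScan on a cons that is not the '\r\n' pattern
theorem pvScan_cons (c : Char) (rest buf : List Char)
    (st : Int × Int × Int × Int × Int × Int) (h : ¬(c = '\r' ∧ rest.head? = some '\n')) :
    pvScan (c :: rest) buf st =
      if c = '\n' ∨ c = '\r' then pvScan rest [] (pvFlush buf st)
      else pvScan rest (buf ++ [c]) st := by
  rw [pvScan.eq_def]
  split
  · simp_all
  · rename_i heq
    injection heq with h1 h2
    exact absurd ⟨h1, by simp [h2]⟩ h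
  · rename_i heq
    injection heq with h1 h2
    subst h1; subst h2; rfl

-- per-line accumulator step (pvFlush with arguments flipped, for foldl)
def pvLineStep (st : Int × Int × Int × Int × Int × Int) (l : List Char) :
    Int × Int × Int × Int × Int × Int := pvFlush l st

-- the streaming scan equals "flush once per line of splitlines"
theorem pvScan_foldl (n : Nat) :
    ∀ (cs : List Char), cs.length ≤ n → (∀ c ∈ cs, pvDomChar c = true) →
    ∀ (buf : List Char) (acc : List (List Char)) (z : Int × Int × Int × Int × Int × Int),
      List.foldl pvLineStep z (PySem.Chars.splitlines.go pvIsB cs buf.reverse acc) =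
        pvScan cs buf (List.foldl pvLineStep z acc.reverse) := by
  induction n with
  | zero =>
    intro cs hlen _ buf acc z
    have : cs = [] := List.eq_nil_of_length_eq_zero (Nat.le_zero.mp hlen)
    subst this
    rw [PySem.Chars.splitlines.go]
    simp only [pvScan, List.isEmpty_reverse]
    by_cases hb : buf.isEmpty
    · simp [hb]
    · simp [hb, pvLineStep, List.foldl_append]
  | succ n ih =>
    intro cs hlen hdom buf acc z
    cases cs with
    | nil =>
      rw [PySem.Chars.splitlines.go]
      simp only [pvScan, List.isEmpty_reverse]
      by_cases hb : buf.isEmpty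
      · simp [hb]
      · simp [hb, pvLineStep, List.foldl_append]
    | cons c rest =>
      have hdc : pvDomChar c = true := hdom c (by simp)
      have hdom' : ∀ x ∈ rest, pvDomChar x = true := fun x hx => hdom x (by simp [hx])
      have hlen' : rest.length ≤ n := by simp at hlen; omega
      by_cases hrn : c = '\r' ∧ rest.head? = some '\n'
      · -- the '\r\n' pattern: both sides consume two characters
        obtain ⟨hc, hr⟩ := hrn
        subst hc
        cases rest with
        | nil => simp at hr
        | cons c2 rest2 =>
          have hc2 : c2 = '\n' := by simpa using hr
          subst hc2
          rw [PySem.Chars.splitlines.go]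
          have hdom'' : ∀ x ∈ rest2, pvDomChar x = true := fun x hx =>
            hdom' x (by simp [hx])
          have hlen'' : rest2.length ≤ n := by simp at hlen'; omega
          have := ih rest2 hlen'' hdom'' [] (buf.reverse.reverse :: acc) z
          simp only [List.reverse_nil] at this
          rw [this]
          simp only [List.reverse_cons, List.reverse_reverse, List.foldl_append,
            List.foldl_cons, List.foldl_nil]
          rfl
      · rw [pvGo_cons _ _ _ _ _ hrn, pvScan_cons _ _ _ _ hrn,
          pvIsB_dom c hdc]
        by_cases hbr : c = '\n' ∨ c = '\r'
        · rw [if_pos (by simpa using hbr), if_pos hbr]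
          have h1 := ih rest hlen' hdom' [] (buf.reverse.reverse :: acc) z
          simp only [List.reverse_nil] at h1
          rw [h1]
          simp only [List.reverse_cons, List.reverse_reverse, List.foldl_append,
            List.foldl_cons, List.foldl_nil]
          rfl
        · rw [if_neg (by simpa using hbr), if_neg hbr]
          have hb : c :: buf.reverse = (buf ++ [c]).reverse := by simp
          rw [hb, ih rest hlen' hdom' (buf ++ [c]) acc z]

-- fold characterisation: componentwise counts over the line list
theorem pvFoldl_lineStep (L : List (List Char)) :
    ∀ (nl a d h g p : Int),
      List.foldl pvLineStep (nl, a, d, h, g, p) L =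
        (nl + L.length,
         a + ((L.filter (fun l => PySem.Chars.startswith l "+".toList)).length : Int),
         d + ((L.filter (fun l => PySem.Chars.startswith l "-".toList)).length : Int),
         h + ((L.filter (fun l => PySem.Chars.startswith l "@@".toList)).length : Int),
         g + ((L.filter (fun l => PySem.Chars.startswith l "diff --git ".toList)).length : Int),
         p + ((L.filter (fun l => PySem.Chars.startswith l "+++ ".toList)).length : Int)) := by
  induction L with
  | nil => intro nl a d h g p; simp
  | cons l L ihL =>
    intro nl a d h g p
    simp only [List.foldl_cons, pvLineStep, pvFlush, List.filter_cons, List.length_cons]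
    rw [ihL]
    split_ifs <;> · simp only [Prod.mk.injEq, List.length_cons]
                    refine ⟨by push_cast; ring, by push_cast; ring, by push_cast; ring,
                      by push_cast; ring, by push_cast; ring, by push_cast; ring⟩

-- shifting the accumulator of A's counting fold
theorem pvCountPrefix_shift (p : String) (lines : List String) (n : Int) :
    lines.foldl (fun acc x => if PySem.Str.startswith x p then acc + 1 else acc) n
      = n + pvCountPrefix p lines := by
  induction lines generalizing n with
  | nil => simp [pvCountPrefix]
  | cons x xs ih =>
    simp only [pvCountPrefix, List.foldl_cons]
    rw [ih, ih]
    split <;> ring_nf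

-- one unfolding of A's counting fold
theorem pvCountPrefix_cons (p x : String) (xs : List String) :
    pvCountPrefix p (x :: xs)
      = (if PySem.Str.startswith x p then 1 else 0) + pvCountPrefix p xs := by
  conv_lhs => rw [pvCountPrefix]
  rw [List.foldl_cons, pvCountPrefix_shift]
  split <;> ring

-- A's filter-length equals the counting fold
theorem pvCountPrefix_eq_filter (p : String) (lines : List String) :
    ((lines.filter (fun x => PySem.Str.startswith x p)).length : Int) = pvCountPrefix p lines := by
  induction lines with
  | nil => simp [pvCountPrefix]
  | cons x xs ih =>
    rw [pvCountPrefix_cons, List.filter_cons]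
    by_cases h : PySem.Str.startswith x p = true
    · rw [if_pos h, if_pos h, List.length_cons]
      push_cast
      rw [ih]; ring
    · rw [if_neg h, if_neg h, ih]; ring

-- filter over the ofList-mapped lines = filter over the char lines
theorem pvFilter_map_ofList (p : String) (L : List (List Char)) :
    ((L.map String.ofList).filter (fun x => PySem.Str.startswith x p)).length
      = (L.filter (fun l => PySem.Chars.startswith l p.toList)).length := by
  rw [List.filter_map, List.length_map]
  congr 1
  apply List.filter_congr
  intro l _
  simp [PySem.Str.startswith]

-- ===== VERDICT =====
theorem metrics_from_patch_text_spec : Claim_equal_metrics_from_patch_text := by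
  intro s hdom
  unfold Spec_metrics_from_patch_text metrics_from_patch_text metrics_from_patch_text_alt
  have hdc : ∀ c ∈ s.toList, pvDomChar c = true := by
    simpa [Dom_metrics_from_patch_text, pvDomStr, List.all_eq_true] using hdom
  have hscan := pvScan_foldl s.toList.length s.toList le_rfl hdc [] [] (0, 0, 0, 0, 0, 0)
  simp only [List.reverse_nil, List.foldl_nil] at hscan
  rw [← pvSplitlines_eq] at hscan
  rw [← hscan, pvFoldl_lineStep]
  have hsl : PySem.Str.splitlines s
      = (PySem.Chars.splitlines s.toList).map String.ofList := rfl
  simp only [hsl, ← pvCountPrefix_eq_filter, pvFilter_map_ofList, List.length_map,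
    zero_add]
  by_cases hg : ((((PySem.Chars.splitlines s.toList).filter
      (fun l => PySem.Chars.startswith l "diff --git ".toList)).length : Int)) = 0
  · rw [if_pos hg, if_neg (not_not_intro hg)]
  · rw [if_neg hg, if_pos hg]
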